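-- pv_equiv track=rewrite | github.com/N283T/pdb-mine-builder | src/mine2/parsers/mmjson.py | clean_array
-- ===== SOURCE A (Python) =====
-- from typing import Any, TypeVar
--
-- def clean_array(array: list[Any]) -> list[Any]:
--     """Remove nulls, empty strings, duplicates, and sort the array.
--
--     Matches original mine2updater cleanArray():
--     - Remove None/null values
--     - Remove empty strings
--     - Remove duplicates (preserving first occurrence)
--     - Sort the result
--
--     Args:
--         array: Input list
--
--     Returns:
--         Cleaned and sorted list
--
--     Example:
--         >>> clean_array(["b", None, "a", "b", "", "c"])
--         ["a", "b", "c"]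
--     """
--     # Remove None, empty strings, and deduplicate using dict (preserves order in Python 3.7+)
--     seen: dict[Any, None] = {}
--     for item in array:
--         if item is not None and item != "":
--             seen[item] = None
--
--     # Sort - handle mixed types by converting to string for comparison
--     result = list(seen.keys())
--     try:
--         result.sort()
--     except TypeError:
--         # Mixed types that can't be compared - sort by string representation
--         result.sort(key=str)
--
--     return result
-- ===== SOURCE B (Python) =====
-- def clean_array(array):
--     """Filter, sort, then drop adjacent duplicates in one pass (no dict dedup)."""
--     items = [item for item in array if item is not None and item != ""]
--     try:
--         items.sort()
--     except TypeError:
--         items.sort(key=str)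
--     result = []
--     i = 0
--     n = len(items)
--     while i < n:
--         first = items[i]
--         result.append(first)
--         i += 1
--         while i < n and items[i] == first:
--             i += 1
--     return result
-- ===== Notes on version B (the rewrite author's own statement) =====
-- stated objective: alternative
-- what changed: Instead of deduplicating up front with a dict and then sorting, B filters without deduping, sorts, and removes duplicates in a single left-to-right pass that skips each run of equal adjacent values.
import Mathlib
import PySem

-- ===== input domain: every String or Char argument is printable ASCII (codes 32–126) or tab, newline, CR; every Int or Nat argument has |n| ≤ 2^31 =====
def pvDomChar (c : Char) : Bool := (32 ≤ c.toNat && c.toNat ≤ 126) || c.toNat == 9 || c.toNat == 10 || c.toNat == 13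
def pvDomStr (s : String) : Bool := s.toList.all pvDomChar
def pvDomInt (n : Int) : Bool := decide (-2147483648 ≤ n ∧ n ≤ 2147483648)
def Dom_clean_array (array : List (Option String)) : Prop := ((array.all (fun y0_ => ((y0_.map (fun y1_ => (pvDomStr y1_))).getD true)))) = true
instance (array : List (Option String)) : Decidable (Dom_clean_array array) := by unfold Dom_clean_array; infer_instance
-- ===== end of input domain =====

-- B replaces A's dict-based up-front dedup by filter, sort, then one pass dropping runs of equal adjacent values (alternative decomposition, same cost).

-- ===== PORT A =====
-- The try/except around result.sort() cannot fire here: all kept items are strings,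
-- so sorting never raises TypeError; it is ported as the plain sort.
def clean_array (array : List (Option String)) : List String :=
  let seen : PySem.Dict String Unit :=
    array.foldl (fun d item =>
      match item with
      | none => d
      | some s => if s ≠ "" then d.insert s () else d) PySem.Dict.empty
  PySem.List.sorted seen.keys (fun x => x) false

-- ===== PORT B =====
-- the outer while loop of Source B, recursing on the suffix items[i:]: take its head,
-- then the inner while loop advances i past the equal prefix (exactly List.dropWhile)
def dedupRuns (l : List String) : List String :=
  match l with
  | [] => []
  | first :: rest => first :: dedupRuns (rest.dropWhile (fun y => y == first))
termination_by l.length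
decreasing_by
  simp only [List.length_cons]
  exact Nat.lt_succ_of_le (List.length_dropWhile_le _ _)

-- Source B's try/except: all items are strings, so sort never raises TypeError; plain sort.
def clean_array_alt (array : List (Option String)) : List String :=
  let items :=
    PySem.List.sorted
      (array.filterMap (fun item =>
        match item with
        | none => none
        | some s => if s ≠ "" then some s else none))
      (fun x => x) false
  dedupRuns items

-- ===== PRECONDITION & SPEC =====
def Spec_clean_array (array : List (Option String)) (out : List String) : Prop := out = clean_array_alt array
instance (array : List (Option String)) (out : List String) : Decidable (Spec_clean_array array out) := by unfold Spec_clean_array; infer_instance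

-- ===== CLAIM (what is proved, stated in full; the proofs are below) =====
def Claim_equal_clean_array : Prop := ∀ (array : List (Option String)), Dom_clean_array array → Spec_clean_array array (clean_array array)

-- ===== LEMMAS AND PROOFS =====

/-- the common filtered list (None and "" removed), as written in B's port -/
def pvFilt (array : List (Option String)) : List String :=
  array.filterMap (fun item =>
    match item with
    | none => none
    | some s => if s ≠ "" then some s else none)

/-- A's filtering dict loop is the plain insert loop over the filtered list. -/
theorem foldl_dict_eq_filt (array : List (Option String)) (d : PySem.Dict String Unit) :
    array.foldl (fun d item =>
      match item with
      | none => d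
      | some s => if s ≠ "" then d.insert s () else d) d
    = (pvFilt array).foldl (fun d s => d.insert s ()) d := by
  induction array generalizing d with
  | nil => rfl
  | cons x xs ih =>
    cases x with
    | none => simpa [pvFilt] using ih d
    | some s =>
      rw [List.foldl_cons]
      by_cases hs : s = ""
      · rw [show (match some s with
            | none => d
            | some s => if s ≠ "" then d.insert s () else d) = d from by simp [hs],
          show pvFilt (some s :: xs) = pvFilt xs from by simp [pvFilt, hs]]
        exact ih d
      · rw [show (match some s with
            | none => d
            | some s => if s ≠ "" then d.insert s () else d) = d.insert s () from by simp [hs],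
          show pvFilt (some s :: xs) = s :: pvFilt xs from by simp [pvFilt, hs],
          List.foldl_cons]
        exact ih _

theorem not_mem_dropWhile_self (first : String) (rest : List String)
    (hp : rest.Pairwise (· ≤ ·)) (hge : ∀ b ∈ rest, first ≤ b) :
    first ∉ rest.dropWhile (fun y => y == first) := by
  induction rest with
  | nil => simp
  | cons r rs ih =>
    rw [List.pairwise_cons] at hp
    by_cases hr : r = first
    · subst hr
      simpa using ih hp.2 hp.1
    · rw [List.dropWhile_cons_of_neg (by simpa using hr)]
      intro hmem
      rcases List.mem_cons.mp hmem with h | h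
      · exact hr h.symm
      · have h1 : r ≤ first := hp.1 first h
        have h2 : first ≤ r := hge r (List.mem_cons_self ..)
        exact hr (le_antisymm h1 h2)

theorem mem_dedupRuns (l : List String) (a : String) :
    a ∈ dedupRuns l ↔ a ∈ l := by
  induction l using dedupRuns.induct with
  | case1 => simp [dedupRuns]
  | case2 first rest ih =>
    rw [dedupRuns]
    constructor
    · intro h
      rcases List.mem_cons.mp h with h | h
      · exact h ▸ List.mem_cons_self ..
      · have := ih.mp h
        exact List.mem_cons.mpr (Or.inr ((rest.dropWhile_sublist _).mem this))
    · intro h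
      rcases List.mem_cons.mp h with h | h
      · exact h ▸ List.mem_cons_self ..
      · rcases (List.mem_append.mp
          (by rw [rest.takeWhile_append_dropWhile (p := fun y => y == first)]; exact h)) with h' | h'
        · have : (a == first) = true := List.mem_takeWhile_imp (p := fun y => y == first) h'
          simp_all
        · exact List.mem_cons.mpr (Or.inr (ih.mpr h'))

theorem pairwise_dedupRuns (l : List String) (hp : l.Pairwise (· ≤ ·)) :
    (dedupRuns l).Pairwise (· < ·) := by
  induction l using dedupRuns.induct with
  | case1 => simp [dedupRuns]
  | case2 first rest ih =>
    rw [List.pairwise_cons] at hp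
    have hsub := rest.dropWhile_sublist (fun y => y == first)
    have hp' := hp.2.sublist hsub
    rw [dedupRuns, List.pairwise_cons]
    refine ⟨?_, ih hp'⟩
    intro b hb
    have hbmem : b ∈ rest.dropWhile (fun y => y == first) := (mem_dedupRuns _ _).mp hb
    have hle : first ≤ b := hp.1 b (hsub.mem hbmem)
    rcases lt_or_eq_of_le hle with h | h
    · exact h
    · exact absurd (h ▸ hbmem) (not_mem_dropWhile_self first rest hp.2 hp.1)

-- ===== VERDICT (by name: the statement is the Claim_ definition above) =====
theorem clean_array_spec : Claim_equal_clean_array := by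
  intro array _
  show clean_array array = clean_array_alt array
  rw [clean_array, clean_array_alt, foldl_dict_eq_filt,
    PySem.Dict.keys_foldl_insert, PySem.Dict.keys_empty, PySem.Set.update_nil_left]
  set F := pvFilt array with hF
  set B := dedupRuns (PySem.List.sorted F (fun x => x) false) with hB
  have hsortP : (PySem.List.sorted F (fun x => x) false).Pairwise (· ≤ ·) :=
    PySem.List.sorted_pairwise F (fun x => x)
  have hBlt : B.Pairwise (· < ·) := pairwise_dedupRuns _ hsortP
  have hBnd : B.Nodup := hBlt.imp (fun h => ne_of_lt h)
  have hmem : ∀ a, a ∈ B ↔ a ∈ PySem.Set.ofList F := by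
    intro a
    rw [hB, mem_dedupRuns, PySem.List.mem_sorted, PySem.Set.mem_ofList]
  have hperm : B.Perm (PySem.Set.ofList F) :=
    (List.perm_ext_iff_of_nodup hBnd (PySem.Set.nodup_ofList F)).mpr hmem
  exact PySem.List.sorted_eq_of_perm_of_pairwise_lt _ _ _ hperm hBlt
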